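-- pv_equiv track=rewrite | github.com/kosukeya/e-functor | efunctor.py | _strip_args
-- ===== SOURCE A (Python) =====
-- from typing import Iterable, List
--
-- def _strip_args(argv: List[str], keys: Iterable[str]) -> List[str]:
--     keys = set(keys)
--     out: List[str] = []
--     skip_next = False
--     for i, tok in enumerate(argv):
--         if skip_next:
--             skip_next = False
--             continue
--         if tok in keys:
--             skip_next = True
--             continue
--         out.append(tok)
--     return out
-- ===== SOURCE B (Python) =====
-- from typing import Iterable, List
--
-- def _strip_args(argv: List[str], keys: Iterable[str]) -> List[str]:
--     ks = set(keys)
--     skip = set()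
--     for i, tok in enumerate(argv):
--         if tok in ks and i not in skip:
--             skip.add(i)
--             skip.add(i + 1)
--     return [tok for i, tok in enumerate(argv) if i not in skip]
-- ===== Notes on version B (the rewrite author's own statement) =====
-- stated objective: alternative
-- what changed: Replaces the single stateful pass carrying a skip_next boolean with two passes: one pass precomputes a set of indices to drop (a key's index and the following index), then a separate comprehension filters argv by index.
import Mathlib
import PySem

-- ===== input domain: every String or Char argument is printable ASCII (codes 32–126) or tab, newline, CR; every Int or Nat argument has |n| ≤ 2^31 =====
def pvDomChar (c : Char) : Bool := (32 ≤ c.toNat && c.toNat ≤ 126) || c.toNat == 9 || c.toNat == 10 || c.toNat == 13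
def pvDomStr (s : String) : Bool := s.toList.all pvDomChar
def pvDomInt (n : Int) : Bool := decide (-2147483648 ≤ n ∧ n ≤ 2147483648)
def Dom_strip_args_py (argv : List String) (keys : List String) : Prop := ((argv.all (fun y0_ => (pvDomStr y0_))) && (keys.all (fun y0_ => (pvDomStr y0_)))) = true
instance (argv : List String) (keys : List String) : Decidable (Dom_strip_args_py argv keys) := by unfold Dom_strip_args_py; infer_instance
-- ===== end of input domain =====

-- B replaces A's single stateful pass (skip_next flag) by two passes: precompute the set of
-- indices to drop, then filter argv by index; alternative decomposition, same cost.

-- ===== PORT A =====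
-- for i, tok in enumerate(argv): state = (skip_next, out)
def strip_args_py (argv : List String) (keys : List String) : List String :=
  let ks := PySem.Set.ofList keys
  let st := (PySem.List.enumerate argv 0).foldl
    (fun (st : Bool × List String) p =>
      if st.1 then (false, st.2)
      else if PySem.Set.contains ks p.2 then (true, st.2)
      else (st.1, st.2 ++ [p.2]))
    (false, [])
  st.2

-- ===== PORT B =====
-- first pass: build the index set `skip`; second pass: comprehension filtering by index
def strip_args_py_alt (argv : List String) (keys : List String) : List String :=
  let ks := PySem.Set.ofList keys
  let skip := (PySem.List.enumerate argv 0).foldl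
    (fun (s : PySem.Set Int) p =>
      if PySem.Set.contains ks p.2 && !(PySem.Set.contains s p.1)
      then PySem.Set.add (PySem.Set.add s p.1) (p.1 + 1) else s)
    PySem.Set.empty
  (PySem.List.enumerate argv 0).filterMap
    (fun p => if PySem.Set.contains skip p.1 then none else some p.2)

-- ===== PRECONDITION & SPEC =====
def Spec_strip_args_py (argv : List String) (keys : List String) (out : List String) : Prop := out = strip_args_py_alt argv keys
instance (argv : List String) (keys : List String) (out : List String) : Decidable (Spec_strip_args_py argv keys out) := by unfold Spec_strip_args_py; infer_instance

-- ===== CLAIM (what is proved, stated in full; the proofs are below) =====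
def Claim_equal_strip_args_py : Prop := ∀ (argv : List String) (keys : List String), Dom_strip_args_py argv keys → Spec_strip_args_py argv keys (strip_args_py argv keys)

-- ===== LEMMAS AND PROOFS =====

-- common reference recursion: A's loop without the accumulator
def pvLoop (ks : PySem.Set String) : Bool → List String → List String
  | _, [] => []
  | true, _ :: r => pvLoop ks false r
  | false, t :: r => if PySem.Set.contains ks t then pvLoop ks true r else t :: pvLoop ks false r

lemma pvLoopA (ks : PySem.Set String) :
    ∀ (argv : List String) (s : Int) (b : Bool) (acc : List String),
    ((PySem.List.enumerate argv s).foldl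
      (fun (st : Bool × List String) p =>
        if st.1 then (false, st.2)
        else if PySem.Set.contains ks p.2 then (true, st.2)
        else (st.1, st.2 ++ [p.2]))
      (b, acc)).2 = acc ++ pvLoop ks b argv := by
  intro argv
  induction argv with
  | nil => intro s b acc; simp [PySem.List.enumerate_nil, pvLoop]
  | cons t r ih =>
    intro s b acc
    rw [PySem.List.enumerate_cons, List.foldl_cons]
    cases b with
    | true =>
      rw [show (if (true, acc).1 then ((false : Bool), (true, acc).2)
          else if PySem.Set.contains ks t then (true, (true, acc).2)
          else ((true, acc).1, (true, acc).2 ++ [t])) = ((false : Bool), acc) from rfl]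
      rw [ih (s+1) false acc]
      rfl
    | false =>
      by_cases h : PySem.Set.contains ks t
      · rw [show (if (false, acc).1 then ((false : Bool), (false, acc).2)
            else if PySem.Set.contains ks t then (true, (false, acc).2)
            else ((false, acc).1, (false, acc).2 ++ [t])) = ((true : Bool), acc) by
          simp only [h]; rfl]
        rw [ih (s+1) true acc]
        have hm := (PySem.Set.contains_iff ks t).1 h
        simp [pvLoop, hm]
      · rw [show (if (false, acc).1 then ((false : Bool), (false, acc).2)
            else if PySem.Set.contains ks t then (true, (false, acc).2)
            else ((false, acc).1, (false, acc).2 ++ [t])) = ((false : Bool), acc ++ [t]) by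
          simp only [h]; rfl]
        rw [ih (s+1) false (acc ++ [t])]
        have hm : t ∉ ks := fun hh => h ((PySem.Set.contains_iff ks t).2 hh)
        simp [pvLoop, hm]

-- B's first pass
def pvFold (ks : PySem.Set String) (argv : List String) (s : Int) (skip : PySem.Set Int) : PySem.Set Int :=
  (PySem.List.enumerate argv s).foldl
    (fun (s : PySem.Set Int) p =>
      if PySem.Set.contains ks p.2 && !(PySem.Set.contains s p.1)
      then PySem.Set.add (PySem.Set.add s p.1) (p.1 + 1) else s)
    skip

lemma pvFold_cons (ks : PySem.Set String) (t : String) (r : List String) (s : Int)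
    (skip : PySem.Set Int) :
    pvFold ks (t :: r) s skip =
      pvFold ks r (s+1)
        (if PySem.Set.contains ks t && !(PySem.Set.contains skip s)
         then PySem.Set.add (PySem.Set.add skip s) (s + 1) else skip) := by
  unfold pvFold
  rw [PySem.List.enumerate_cons, List.foldl_cons]

lemma pvFold_low (ks : PySem.Set String) :
    ∀ (argv : List String) (s : Int) (skip : PySem.Set Int) (m : Int), m < s →
    (m ∈ pvFold ks argv s skip ↔ m ∈ skip) := by
  intro argv
  induction argv with
  | nil => intro s skip m _; simp [pvFold, PySem.List.enumerate_nil]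
  | cons t r ih =>
    intro s skip m hm
    rw [pvFold_cons]
    by_cases hcond : PySem.Set.contains ks t && !(PySem.Set.contains skip s)
    · rw [if_pos hcond, ih (s+1) _ m (by omega),
        PySem.Set.mem_add, PySem.Set.mem_add]
      constructor
      · rintro ((h | rfl) | rfl) <;> first | exact h | omega
      · intro h; exact Or.inl (Or.inl h)
    · rw [if_neg hcond]
      exact ih (s+1) skip m (by omega)

lemma pvMain (ks : PySem.Set String) :
    ∀ (argv : List String) (s : Int) (skip : PySem.Set Int), (∀ m ∈ skip, m ≤ s) →
    (PySem.List.enumerate argv s).filterMap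
      (fun p => if PySem.Set.contains (pvFold ks argv s skip) p.1 then none else some p.2)
    = pvLoop ks (decide (s ∈ skip)) argv := by
  intro argv
  induction argv with
  | nil => intro s skip _; simp [pvFold, PySem.List.enumerate_nil, pvLoop]
  | cons t r ih =>
    intro s skip hb
    rw [PySem.List.enumerate_cons, List.filterMap_cons]
    by_cases hsk : s ∈ skip
    · -- value slot: never tested as a key
      have hc : PySem.Set.contains skip s = true := (PySem.Set.contains_iff _ _).2 hsk
      have hfold' : pvFold ks (t :: r) s skip = pvFold ks r (s+1) skip := by
        rw [pvFold_cons, hc]; simp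
      have hmem : s ∈ pvFold ks (t :: r) s skip := by
        rw [hfold']; exact (pvFold_low ks r (s+1) skip s (by omega)).2 hsk
      have hnext : (s + 1) ∉ skip := fun h => absurd (hb _ h) (by omega)
      rw [(PySem.Set.contains_iff _ _).2 hmem, if_pos rfl, hfold']
      have hrec := ih (s+1) skip (fun m hm => by have := hb m hm; omega)
      rw [decide_eq_false hnext] at hrec
      rw [hrec]
      simp [pvLoop, hsk]
    · have hc : PySem.Set.contains skip s = false := by
        rw [Bool.eq_false_iff]
        exact fun h => hsk ((PySem.Set.contains_iff _ _).1 h)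
      by_cases hk : PySem.Set.contains ks t
      · -- a key: drop it and mark the next index
        have hfold' : pvFold ks (t :: r) s skip =
            pvFold ks r (s+1) (PySem.Set.add (PySem.Set.add skip s) (s + 1)) := by
          rw [pvFold_cons, hc, hk]; rfl
        have hmem : s ∈ pvFold ks (t :: r) s skip := by
          rw [hfold']
          refine (pvFold_low ks r (s+1) _ s (by omega)).2 ?_
          rw [PySem.Set.mem_add, PySem.Set.mem_add]
          exact Or.inl (Or.inr rfl)
        rw [(PySem.Set.contains_iff _ _).2 hmem, if_pos rfl, hfold']
        have hbound : ∀ m ∈ PySem.Set.add (PySem.Set.add skip s) (s + 1), m ≤ s + 1 := by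
          intro m hm
          rw [PySem.Set.mem_add, PySem.Set.mem_add] at hm
          rcases hm with (h | rfl) | rfl
          · have := hb m h; omega
          · omega
          · omega
        have hnext : (s + 1) ∈ PySem.Set.add (PySem.Set.add skip s) (s + 1) := by
          rw [PySem.Set.mem_add]; exact Or.inr rfl
        have hrec := ih (s+1) _ hbound
        rw [decide_eq_true hnext] at hrec
        rw [hrec]
        have hmk := (PySem.Set.contains_iff ks t).1 hk
        simp [pvLoop, hsk, hmk]
      · -- ordinary token: kept
        have hfold' : pvFold ks (t :: r) s skip = pvFold ks r (s+1) skip := by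
          rw [pvFold_cons, Bool.eq_false_iff.2 hk]; rfl
        have hnm : s ∉ pvFold ks (t :: r) s skip := by
          rw [hfold']
          exact fun h => hsk ((pvFold_low ks r (s+1) skip s (by omega)).1 h)
        have hcS : PySem.Set.contains (pvFold ks (t :: r) s skip) s = false := by
          rw [Bool.eq_false_iff]
          exact fun h => hnm ((PySem.Set.contains_iff _ _).1 h)
        rw [hcS, if_neg (by simp), hfold']
        have hnext : (s + 1) ∉ skip := fun h => absurd (hb _ h) (by omega)
        have hrec := ih (s+1) skip (fun m hm => by have := hb m hm; omega)
        rw [decide_eq_false hnext] at hrec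
        rw [hrec]
        have hmk : t ∉ ks := fun hh => hk ((PySem.Set.contains_iff ks t).2 hh)
        simp [pvLoop, hsk, hmk]

-- ===== VERDICT (by name: the statement is the Claim_ definition above) =====
theorem strip_args_py_spec : Claim_equal_strip_args_py := by
  intro argv keys _
  unfold Spec_strip_args_py strip_args_py strip_args_py_alt
  rw [pvLoopA (PySem.Set.ofList keys) argv 0 false []]
  have h := pvMain (PySem.Set.ofList keys) argv 0 PySem.Set.empty
    (by intro m hm; simp [PySem.Set.empty] at hm)
  rw [decide_eq_false (by simp [PySem.Set.empty])] at h
  rw [List.nil_append]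
  exact h.symm
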